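-- pv_equiv track=rewrite | github.com/MrBrantCode/unitest_baseline | mut_generate/mist_train_cf/cf_17290/solution.py | highest_prime_palindrome
-- ===== SOURCE A (Python) =====
-- import math
--
-- def highest_prime_palindrome(numbers):
--     def is_prime(num):
--         if num <= 1:
--             return False
--         for i in range(2, int(math.sqrt(num)) + 1):
--             if num % i == 0:
--                 return False
--         return True
--
--     def is_palindrome(num):
--         num_str = str(num)
--         return num_str == num_str[::-1]
--
--     highest = 0
--     for num in numbers:
--         if is_prime(num) and is_palindrome(num):
--             highest = max(highest, num)
--     return highest
-- ===== SOURCE B (Python) =====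
-- import math
--
-- def highest_prime_palindrome(numbers):
--     def is_prime(num):
--         if num <= 1:
--             return False
--         for i in range(2, int(math.sqrt(num)) + 1):
--             if num % i == 0:
--                 return False
--         return True
--
--     def is_palindrome(num):
--         num_str = str(num)
--         return num_str == num_str[::-1]
--
--     for num in sorted(numbers, reverse=True):
--         if is_prime(num) and is_palindrome(num):
--             return num
--     return 0
-- ===== Notes on version B (the rewrite author's own statement) =====
-- stated objective: alternative
-- what changed: B sorts the list in descending order and returns the first prime palindrome it meets (0 if none), replacing A's full scan with a running max accumulator.
import Mathlib
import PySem

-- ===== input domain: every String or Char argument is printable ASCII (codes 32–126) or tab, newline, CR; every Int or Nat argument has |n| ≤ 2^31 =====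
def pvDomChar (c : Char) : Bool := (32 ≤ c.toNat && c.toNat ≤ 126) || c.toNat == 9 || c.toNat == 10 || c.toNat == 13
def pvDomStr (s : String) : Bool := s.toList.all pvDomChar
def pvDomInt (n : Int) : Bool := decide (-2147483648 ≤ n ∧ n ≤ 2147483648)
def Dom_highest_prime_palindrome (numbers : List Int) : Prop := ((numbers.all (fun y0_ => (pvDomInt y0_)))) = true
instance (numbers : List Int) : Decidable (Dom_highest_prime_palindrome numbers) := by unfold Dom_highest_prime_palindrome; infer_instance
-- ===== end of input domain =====

-- B sorts descending and returns the first prime palindrome (0 if none) instead of A's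
-- running-max full scan; objective: alternative decomposition, same helpers.

-- ===== PORT A =====
-- shared helper of both Pythons: is_prime.  int(math.sqrt(num)) is exact floor-sqrt for
-- 0 ≤ num ≤ 2^31 (only reached when num ≥ 2), ported as Int.sqrt; the early-return loop is .any
def pyIsPrime (num : Int) : Bool :=
  if num ≤ 1 then false
  else !(PySem.List.pyRange 2 (Int.sqrt num + 1) 1).any (fun i => PySem.Int.mod num i == 0)

-- shared helper: is_palindrome; num_str[::-1] is the reversal of the string
def pyIsPalindrome (num : Int) : Bool :=
  let cs := PySem.Int.toChars num
  cs == cs.reverse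

def highest_prime_palindrome (numbers : List Int) : Int :=
  numbers.foldl
    (fun highest num =>
      if pyIsPrime num && pyIsPalindrome num then max highest num else highest) 0

-- ===== PORT B =====
def highest_prime_palindrome_alt (numbers : List Int) : Int :=
  match (PySem.List.sorted numbers (fun x => x) true).find?
      (fun num => pyIsPrime num && pyIsPalindrome num) with
  | some n => n
  | none => 0

-- ===== PRECONDITION & SPEC =====
def Spec_highest_prime_palindrome (numbers : List Int) (out : Int) : Prop := out = highest_prime_palindrome_alt numbers
instance (numbers : List Int) (out : Int) : Decidable (Spec_highest_prime_palindrome numbers out) := by unfold Spec_highest_prime_palindrome; infer_instance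

-- ===== CLAIM (what is proved, stated in full; the proofs are below) =====
def Claim_equal_highest_prime_palindrome : Prop := ∀ (numbers : List Int), Dom_highest_prime_palindrome numbers → Spec_highest_prime_palindrome numbers (highest_prime_palindrome numbers)

-- ===== LEMMAS AND PROOFS =====

-- qualifiers are ≥ 2 (is_prime rejects num ≤ 1)
theorem two_le_of_qual {n : Int} (h : (pyIsPrime n && pyIsPalindrome n) = true) : 2 ≤ n := by
  simp only [Bool.and_eq_true] at h
  obtain ⟨hp, -⟩ := h
  unfold pyIsPrime at hp
  by_contra hlt
  simp [show n ≤ 1 by omega] at hp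

-- A's loop is a fold of max over the qualifying elements
theorem foldA_filter (l : List Int) (a : Int) :
    l.foldl (fun highest num =>
      if pyIsPrime num && pyIsPalindrome num then max highest num else highest) a
    = (l.filter (fun num => pyIsPrime num && pyIsPalindrome num)).foldl max a := by
  induction l generalizing a with
  | nil => rfl
  | cons x xs ih =>
    rw [List.foldl_cons, List.filter_cons]
    cases h : (pyIsPrime x && pyIsPalindrome x) with
    | false =>
      simp only [Bool.false_eq_true, if_false]
      exact ih a
    | true =>
      simp only [if_true, List.foldl_cons]
      exact ih (max a x)

theorem foldl_max_of_le (l : List Int) (a : Int) (h : ∀ r ∈ l, r ≤ a) :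
    l.foldl max a = a := by
  induction l generalizing a with
  | nil => rfl
  | cons x xs ih =>
    have hx : x ≤ a := h x (by simp)
    simp only [List.foldl_cons, max_eq_left hx]
    exact ih a (fun r hr => h r (by simp [hr]))

theorem highest_prime_palindrome_spec' (numbers : List Int) :
    highest_prime_palindrome numbers = highest_prime_palindrome_alt numbers := by
  classical
  set P : Int → Bool := fun num => pyIsPrime num && pyIsPalindrome num with hP
  set s : List Int := PySem.List.sorted numbers (fun x => x) true with hs
  have hperm : s.Perm numbers := PySem.List.sorted_perm numbers (fun x => x) true
  have hpair : s.Pairwise (fun a b => b ≤ a) :=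
    PySem.List.sorted_pairwise_rev numbers (fun x => x)
  have hA : highest_prime_palindrome numbers = (numbers.filter P).foldl max 0 :=
    foldA_filter numbers 0
  have hpermf : (s.filter P).Perm (numbers.filter P) := hperm.filter P
  have hfoldperm : (s.filter P).foldl max 0 = (numbers.filter P).foldl max 0 :=
    hpermf.foldl_eq (f := max) 0
  have hfind : (s.find? P) = (s.filter P).head? := Eq.symm List.head?_filter
  rw [hA, ← hfoldperm]
  unfold highest_prime_palindrome_alt
  rw [← hs, ← hP, hfind]
  cases hfp : s.filter P with
  | nil => simp
  | cons x rest =>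
    have hpairf : (s.filter P).Pairwise (fun a b => b ≤ a) := hpair.filter P
    rw [hfp] at hpairf
    have hrest : ∀ r ∈ rest, r ≤ x := (List.pairwise_cons.mp hpairf).1
    have hx : P x = true := by
      have := List.of_mem_filter (a := x) (l := s) (p := P) (by rw [hfp]; simp)
      exact this
    have h2 : (2 : Int) ≤ x := two_le_of_qual hx
    simp only [List.foldl_cons, List.head?_cons]
    rw [max_eq_right (by omega : (0:Int) ≤ x)]
    exact foldl_max_of_le rest x hrest

-- ===== VERDICT (by name: the statement is the Claim_ definition above) =====
theorem highest_prime_palindrome_spec : Claim_equal_highest_prime_palindrome := by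
  intro numbers _
  exact highest_prime_palindrome_spec' numbers
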